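-- pv_equiv track=rewrite | github.com/RoboticSJTU/swm | scripts/eval_keyframe.py | clean_indices
-- ===== SOURCE A (Python) =====
-- def clean_indices(xs, n):
--     if not isinstance(xs, list):
--         return []
--     out = []
--     seen = set()
--     for x in xs:
--         try:
--             i = int(x)
--         except Exception:
--             continue
--         if 1 <= i <= n and i not in seen:
--             out.append(i)
--             seen.add(i)
--     out.sort()
--     return out
-- ===== SOURCE B (Python) =====
-- def clean_indices(xs, n):
--     if not isinstance(xs, list):
--         return []
--     valid = []
--     for x in xs:
--         try:
--             i = int(x)
--         except Exception:
--             continue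
--         if 1 <= i <= n:
--             valid.append(i)
--     valid.sort()
--     out = []
--     for i in valid:
--         if not out or out[-1] != i:
--             out.append(i)
--     return out
-- ===== Notes on version B (the rewrite author's own statement) =====
-- stated objective: alternative
-- what changed: B removes the seen-set entirely: it collects in-range values into a plain list, sorts it, and deduplicates by a single scan comparing each element to the last emitted one (sort-then-adjacent-scan dedup instead of hash-set dedup).
import Mathlib
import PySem

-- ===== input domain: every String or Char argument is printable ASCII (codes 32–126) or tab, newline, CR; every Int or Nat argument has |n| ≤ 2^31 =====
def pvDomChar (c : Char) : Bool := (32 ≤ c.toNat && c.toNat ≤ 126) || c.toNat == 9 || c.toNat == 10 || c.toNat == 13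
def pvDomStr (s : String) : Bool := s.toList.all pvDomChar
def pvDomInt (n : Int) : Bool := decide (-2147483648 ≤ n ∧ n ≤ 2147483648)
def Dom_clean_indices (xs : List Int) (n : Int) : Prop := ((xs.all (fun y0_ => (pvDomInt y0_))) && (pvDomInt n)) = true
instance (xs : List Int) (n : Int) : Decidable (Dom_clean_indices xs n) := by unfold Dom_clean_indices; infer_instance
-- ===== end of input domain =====

-- B removes A's seen-set entirely: it filters the in-range values into a plain
-- list, sorts it, and deduplicates with one scan comparing each element to the
-- last emitted one (sort-then-adjacent-scan dedup; objective: alternative).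
-- (xs : List Int, so the isinstance guard and the int() try/except never fire.)

-- ===== PORT A =====
-- out/seen loop: append i and add it to seen only when in range and unseen; sort at the end
def clean_indices (xs : List Int) (n : Int) : List Int :=
  let st := xs.foldl
    (fun (st : List Int × PySem.Set Int) x =>
      let i := x
      if 1 ≤ i ∧ i ≤ n ∧ PySem.Set.contains st.2 i = false
      then (st.1 ++ [i], PySem.Set.add st.2 i) else st)
    ([], PySem.Set.empty)
  PySem.List.sorted st.1 (fun x => x) false

-- ===== PORT B =====
-- collect in-range values, sort, then one scan appending i unless it equals out[-1]
def clean_indices_alt (xs : List Int) (n : Int) : List Int :=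
  let valid := xs.foldl
    (fun (v : List Int) x =>
      let i := x
      if 1 ≤ i ∧ i ≤ n then v ++ [i] else v) []
  let validSorted := PySem.List.sorted valid (fun x => x) false
  validSorted.foldl
    (fun (out : List Int) i =>
      if out = [] ∨ PySem.List.pyGetD out (-1) 0 ≠ i then out ++ [i] else out) []

-- ===== PRECONDITION & SPEC =====
def Spec_clean_indices (xs : List Int) (n : Int) (out : List Int) : Prop := out = clean_indices_alt xs n
instance (xs : List Int) (n : Int) (out : List Int) : Decidable (Spec_clean_indices xs n out) := by unfold Spec_clean_indices; infer_instance

-- ===== CLAIM (what is proved, stated in full; the proofs are below) =====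
def Claim_equal_clean_indices : Prop := ∀ (xs : List Int) (n : Int), Dom_clean_indices xs n → Spec_clean_indices xs n (clean_indices xs n)

-- ===== LEMMAS AND PROOFS =====

-- A's paired (out, seen) fold keeps both components equal, and on the shared
-- component it acts as Set.add on exactly the in-range elements.
lemma pv_foldA_eq (n : Int) (xs : List Int) (s : PySem.Set Int) :
    xs.foldl
      (fun (st : List Int × PySem.Set Int) x =>
        let i := x
        if 1 ≤ i ∧ i ≤ n ∧ PySem.Set.contains st.2 i = false
        then (st.1 ++ [i], PySem.Set.add st.2 i) else st)
      (s, s)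
    = ((xs.filter (fun x => decide (1 ≤ x ∧ x ≤ n))).foldl PySem.Set.add s,
       (xs.filter (fun x => decide (1 ≤ x ∧ x ≤ n))).foldl PySem.Set.add s) := by
  induction xs generalizing s with
  | nil => rfl
  | cons x xs ih =>
    rw [List.foldl_cons, List.filter_cons]
    by_cases hx : 1 ≤ x ∧ x ≤ n
    · have hstep :
        (if 1 ≤ x ∧ x ≤ n ∧ PySem.Set.contains ((s, s) : List Int × PySem.Set Int).2 x = false
         then (((s, s) : List Int × PySem.Set Int).1 ++ [x], PySem.Set.add ((s, s) : List Int × PySem.Set Int).2 x)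
         else ((s, s) : List Int × PySem.Set Int))
        = (PySem.Set.add s x, PySem.Set.add s x) := by
        cases hc : PySem.Set.contains s x
        · have hm : x ∉ s := fun h => by
            rw [(PySem.Set.contains_iff s x).mpr h] at hc; cases hc
          simp [PySem.Set.add, hx, hm]
        · have hm : x ∈ s := (PySem.Set.contains_iff s x).mp hc
          simp [PySem.Set.add, hx, hm]
      rw [hstep, if_pos (by simpa using hx), List.foldl_cons]
      exact ih (PySem.Set.add s x)
    · rw [if_neg (fun h => hx ⟨h.1, h.2.1⟩), if_neg (by simpa using hx)]
      exact ih s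

-- zeta-reduced form of pv_foldA_eq at the empty start state (defeq)
lemma pv_foldA_empty (n : Int) (xs : List Int) :
    List.foldl
      (fun (st : List Int × PySem.Set Int) x =>
        if 1 ≤ x ∧ x ≤ n ∧ PySem.Set.contains st.2 x = false
        then (st.1 ++ [x], PySem.Set.add st.2 x) else st)
      ([], PySem.Set.empty) xs
    = ((xs.filter (fun x => decide (1 ≤ x ∧ x ≤ n))).foldl PySem.Set.add [],
       (xs.filter (fun x => decide (1 ≤ x ∧ x ≤ n))).foldl PySem.Set.add []) :=
  pv_foldA_eq n xs []

-- recursive view of B's adjacent-dedup scan, relative to the last emitted value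
def pvDD (l : Int) : List Int → List Int
  | [] => []
  | y :: ys => if y = l then pvDD l ys else y :: pvDD y ys

-- B's foldl, started from a nonempty accumulator, is append of pvDD at the last element
lemma pv_foldB_eq (ys acc : List Int) (x : Int) :
    ys.foldl
      (fun (out : List Int) i =>
        if out = [] ∨ PySem.List.pyGetD out (-1) 0 ≠ i then out ++ [i] else out)
      (acc ++ [x])
    = (acc ++ [x]) ++ pvDD x ys := by
  induction ys generalizing acc x with
  | nil => simp [pvDD]
  | cons y ys ih =>
    rw [List.foldl_cons]
    by_cases hy : y = x
    · subst hy
      rw [if_neg (by simp [PySem.List.pyGetD_neg_one_append_singleton])]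
      simpa [pvDD] using ih acc y
    · rw [if_pos (Or.inr (by
        rw [PySem.List.pyGetD_neg_one_append_singleton]
        exact fun h => hy h.symm))]
      rw [show pvDD x (y :: ys) = y :: pvDD y ys from by simp [pvDD, hy]]
      simpa using ih (acc ++ [x]) y

-- every element of pvDD l ys comes from ys
lemma pv_mem_pvDD {x l : Int} {ys : List Int} (h : x ∈ pvDD l ys) : x ∈ ys := by
  induction ys generalizing l with
  | nil => simp [pvDD] at h
  | cons y ys ih =>
    rw [pvDD] at h
    by_cases hy : y = l
    · exact List.mem_cons_of_mem _ (ih (by simpa [hy] using h))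
    · rw [if_neg hy] at h
      rcases List.mem_cons.mp h with h | h
      · exact h ▸ List.mem_cons_self
      · exact List.mem_cons_of_mem _ (ih h)

-- on a ≤-sorted tail bounded below by l, pvDD keeps every element other than l
lemma pv_pvDD_complete {l : Int} {ys : List Int}
    (hs : ys.Pairwise (· ≤ ·)) (hl : ∀ z ∈ ys, l ≤ z) :
    ∀ x ∈ ys, x = l ∨ x ∈ pvDD l ys := by
  induction ys generalizing l with
  | nil => intro x hx; cases hx
  | cons y ys ih =>
    intro x hx
    rw [pvDD]
    rcases List.pairwise_cons.mp hs with ⟨hy, hs'⟩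
    by_cases hyl : y = l
    · rw [if_pos hyl]
      rcases List.mem_cons.mp hx with h | h
      · exact Or.inl (h.trans hyl)
      · exact ih hs' (fun z hz => hyl ▸ hy z hz) x h
    · rw [if_neg hyl]
      rcases List.mem_cons.mp hx with h | h
      · exact Or.inr (h ▸ List.mem_cons_self)
      · rcases ih hs' hy x h with h' | h'
        · exact Or.inr (h' ▸ List.mem_cons_self)
        · exact Or.inr (List.mem_cons_of_mem _ h')

-- on a ≤-sorted tail strictly above nothing below l, pvDD is strictly increasing and above l
lemma pv_pvDD_strict {l : Int} {ys : List Int}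
    (hs : ys.Pairwise (· ≤ ·)) (hl : ∀ z ∈ ys, l ≤ z) :
    (pvDD l ys).Pairwise (· < ·) ∧ ∀ z ∈ pvDD l ys, l < z := by
  induction ys generalizing l with
  | nil => exact ⟨List.Pairwise.nil, by intro z hz; cases hz⟩
  | cons y ys ih =>
    rcases List.pairwise_cons.mp hs with ⟨hy, hs'⟩
    rw [pvDD]
    by_cases hyl : y = l
    · rw [if_pos hyl]
      exact ih hs' (fun z hz => hyl ▸ hy z hz)
    · rw [if_neg hyl]
      have hly : l < y := lt_of_le_of_ne (hl y List.mem_cons_self) (fun h => hyl h.symm)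
      rcases ih hs' hy with ⟨hp, habove⟩
      refine ⟨List.pairwise_cons.mpr ⟨habove, hp⟩, ?_⟩
      intro z hz
      rcases List.mem_cons.mp hz with h | h
      · exact h ▸ hly
      · exact hly.trans (habove z h)

theorem clean_indices_spec : Claim_equal_clean_indices := by
  intro xs n _
  unfold Spec_clean_indices clean_indices clean_indices_alt
  simp only [PySem.List.foldl_append_ite_eq_filter, List.nil_append]
  rw [pv_foldA_empty n xs]
  set f := xs.filter (fun x => decide (1 ≤ x ∧ x ≤ n)) with hf
  rw [← PySem.Set.ofList_eq_foldl]
  -- name B's result via the recursive view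
  have hsortp : (PySem.List.sorted f (fun x => x) false).Pairwise (· ≤ ·) :=
    PySem.List.sorted_pairwise f (fun x => x)
  cases hy : PySem.List.sorted f (fun x => x) false with
  | nil =>
    have hfnil : f = [] := (PySem.List.sorted_eq_nil_iff f _ false).mp hy
    simp [hfnil, PySem.Set.ofList, PySem.List.sorted]
  | cons y ys =>
    have hB : (y :: ys).foldl
        (fun (out : List Int) i =>
          if out = [] ∨ PySem.List.pyGetD out (-1) 0 ≠ i then out ++ [i] else out) []
        = y :: pvDD y ys := by
      rw [List.foldl_cons, if_pos (Or.inl rfl)]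
      simpa using pv_foldB_eq ys [] y
    rw [hB]
    rw [hy] at hsortp
    rcases List.pairwise_cons.mp hsortp with ⟨hyle, hs'⟩
    -- the target y :: pvDD y ys is a strictly increasing rearrangement of Set.ofList f
    rcases pv_pvDD_strict hs' hyle with ⟨hp, habove⟩
    have hstrict : (y :: pvDD y ys).Pairwise (· < ·) :=
      List.pairwise_cons.mpr ⟨habove, hp⟩
    have hmem : ∀ x : Int, x ∈ y :: pvDD y ys ↔ x ∈ PySem.Set.ofList f := by
      intro x
      rw [PySem.Set.mem_ofList]
      constructor
      · intro hx
        have hxys : x ∈ y :: ys := by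
          rcases List.mem_cons.mp hx with h | h
          · exact h ▸ List.mem_cons_self
          · exact List.mem_cons_of_mem _ (pv_mem_pvDD h)
        have : x ∈ PySem.List.sorted f (fun x => x) false := hy ▸ hxys
        exact (PySem.List.mem_sorted f _ false x).mp this
      · intro hx
        have hxs : x ∈ y :: ys := by
          have : x ∈ PySem.List.sorted f (fun x => x) false :=
            (PySem.List.mem_sorted f _ false x).mpr hx
          exact hy ▸ this
        rcases List.mem_cons.mp hxs with h | h
        · exact h ▸ List.mem_cons_self
        · rcases pv_pvDD_complete hs' hyle x h with h' | h'
          · exact h' ▸ List.mem_cons_self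
          · exact List.mem_cons_of_mem _ h'
    have hnd1 : (y :: pvDD y ys).Nodup := hstrict.imp (fun h => ne_of_lt h)
    have hnd2 : (PySem.Set.ofList f).Nodup := PySem.Set.nodup_ofList f
    have hperm : (y :: pvDD y ys).Perm (PySem.Set.ofList f) :=
      (List.perm_ext_iff_of_nodup hnd1 hnd2).mpr hmem
    exact PySem.List.sorted_eq_of_perm_of_pairwise_lt _ _ _ hperm hstrict
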